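-- pv_equiv track=rewrite | github.com/Gama43/Estrutura-de-Dados | atividade 4.py | verificar_operador
-- ===== SOURCE A (Python) =====
-- def verificar_operador(expressao):
--     i = len(expressao) - 1
--     while i >= 0:
--         x = expressao[i]
--         if x == '+' or x == '-':
--             return i
--
--         else:
--             if "+" not in expressao and "-" not in expressao:
--                 if x == '*' or x == '/':
--
--                     return i
--         i -= 1
-- ===== SOURCE B (Python) =====
-- def verificar_operador(expressao):
--     add = -1
--     mul = -1
--     for i, x in enumerate(expressao):
--         if x == '+' or x == '-':
--             add = i
--         elif x == '*' or x == '/':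
--             mul = i
--     if add != -1:
--         return add
--     if mul != -1:
--         return mul
--     return None
-- ===== Notes on version B (the rewrite author's own statement) =====
-- stated objective: faster
-- what changed: Replaces the backward scan that re-tests whole-string membership ('+' in expressao) on every iteration by a single forward pass maintaining the last-seen indices of additive and multiplicative operators.
import Mathlib
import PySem

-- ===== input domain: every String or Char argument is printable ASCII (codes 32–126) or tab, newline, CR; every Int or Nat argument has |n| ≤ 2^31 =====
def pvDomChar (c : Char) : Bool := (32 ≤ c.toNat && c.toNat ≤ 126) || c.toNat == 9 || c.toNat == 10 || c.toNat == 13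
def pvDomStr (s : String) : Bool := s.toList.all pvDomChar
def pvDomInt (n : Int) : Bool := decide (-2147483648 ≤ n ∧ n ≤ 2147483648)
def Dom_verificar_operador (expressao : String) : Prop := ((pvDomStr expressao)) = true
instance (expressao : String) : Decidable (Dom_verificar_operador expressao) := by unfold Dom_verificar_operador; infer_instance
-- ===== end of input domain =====

-- B replaces A's backward scan with whole-string membership tests by one forward pass
-- keeping the last-seen additive and multiplicative operator indices (O(n) instead of O(n^2); measured faster).

-- ===== PORT A =====
-- the while loop, counting i down; fuel n means current index i = n - 1, n = 0 means i < 0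
def verificar_operador_loop (cs : List Char) : Nat → Option Int
  | 0 => none
  | n + 1 =>
    match PySem.List.pyGet? cs (n : Int) with
    | none => none  -- unreachable: 0 ≤ n < len cs
    | some x =>
      if x = '+' ∨ x = '-' then some (n : Int)
      else
        if PySem.Chars.isIn ['+'] cs = false ∧ PySem.Chars.isIn ['-'] cs = false then
          if x = '*' ∨ x = '/' then some (n : Int)
          else verificar_operador_loop cs n
        else verificar_operador_loop cs n

def verificar_operador (expressao : String) : Option Int :=
  verificar_operador_loop expressao.toList expressao.toList.length

-- ===== PORT B =====
def verificar_operador_alt (expressao : String) : Option Int :=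
  let st :=
    (PySem.List.enumerate expressao.toList).foldl
      (fun (st : Int × Int) p =>
        if p.2 = '+' ∨ p.2 = '-' then (p.1, st.2)
        else if p.2 = '*' ∨ p.2 = '/' then (st.1, p.1)
        else st)
      (-1, -1)
  if st.1 ≠ -1 then some st.1
  else if st.2 ≠ -1 then some st.2
  else none

-- ===== PRECONDITION & SPEC =====
def Spec_verificar_operador (expressao : String) (out : Option Int) : Prop := out = verificar_operador_alt expressao
instance (expressao : String) (out : Option Int) : Decidable (Spec_verificar_operador expressao out) := by unfold Spec_verificar_operador; infer_instance

-- ===== CLAIM (what is proved, stated in full; the proofs are below) =====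
def Claim_equal_verificar_operador : Prop := ∀ (expressao : String), Dom_verificar_operador expressao → Spec_verificar_operador expressao (verificar_operador expressao)

-- ===== LEMMAS AND PROOFS =====

-- index of the last element satisfying p, or -1
def lastIdxI (p : Char → Bool) : List Char → Int
  | [] => -1
  | c :: cs =>
    let r := lastIdxI p cs
    if r ≠ -1 then r + 1 else if p c then 0 else -1

def pAdd (c : Char) : Bool := decide (c = '+' ∨ c = '-')
def pMul (c : Char) : Bool := decide (c = '*' ∨ c = '/')

theorem lastIdxI_ge (p : Char → Bool) (cs : List Char) : -1 ≤ lastIdxI p cs := by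
  induction cs with
  | nil => simp [lastIdxI]
  | cons c cs ih =>
    simp only [lastIdxI]
    split_ifs <;> omega

theorem lastIdxI_snoc (p : Char → Bool) (ds : List Char) (c : Char) :
    lastIdxI p (ds ++ [c]) = if p c then (ds.length : Int) else lastIdxI p ds := by
  induction ds with
  | nil => simp [lastIdxI]
  | cons d ds ih =>
    simp only [List.cons_append, lastIdxI, ih]
    by_cases hc : p c
    · have : (ds.length : Int) ≠ -1 := by omega
      simp [hc, this]
    · simp [hc]

theorem lastIdxI_eq_neg_one_iff (p : Char → Bool) (cs : List Char) :
    lastIdxI p cs = -1 ↔ ∀ x ∈ cs, p x = false := by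
  induction cs with
  | nil => simp [lastIdxI]
  | cons c cs ih =>
    simp only [lastIdxI, List.mem_cons]
    constructor
    · intro hEq x hx
      have hg := lastIdxI_ge p cs
      by_cases h1 : lastIdxI p cs ≠ -1
      · rw [if_pos h1] at hEq; omega
      · rw [if_neg h1] at hEq
        rw [not_not] at h1
        by_cases h2 : p c = true
        · rw [if_pos h2] at hEq; norm_num at hEq
        · rcases hx with rfl | hx
          · simpa using h2
          · exact ih.mp h1 x hx
    · intro h
      have h1 : lastIdxI p cs = -1 := ih.mpr (fun x hx => h x (Or.inr hx))
      have h2 : p c = false := h c (Or.inl rfl)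
      simp [h1, h2]

-- no additive operator in cs ↔ A's membership condition
theorem no_add_iff (cs : List Char) :
    (PySem.Chars.isIn ['+'] cs = false ∧ PySem.Chars.isIn ['-'] cs = false) ↔
      (∀ x ∈ cs, pAdd x = false) := by
  simp only [PySem.Chars.isIn_eq_false_iff, List.singleton_infix_iff, pAdd]
  constructor
  · rintro ⟨h1, h2⟩ x hx
    simp only [decide_eq_false_iff_not]
    rintro (rfl | rfl) <;> [exact h1 hx; exact h2 hx]
  · intro h
    constructor <;> intro hm <;> simpa using h _ hm

-- B's fold maintains the last-seen additive and multiplicative indices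
theorem bfold_eq (cs : List Char) :
    (PySem.List.enumerate cs).foldl
      (fun (st : Int × Int) p =>
        if p.2 = '+' ∨ p.2 = '-' then (p.1, st.2)
        else if p.2 = '*' ∨ p.2 = '/' then (st.1, p.1)
        else st)
      (-1, -1) = (lastIdxI pAdd cs, lastIdxI pMul cs) := by
  induction cs using List.reverseRecOn with
  | nil => simp [PySem.List.enumerate, lastIdxI]
  | append_singleton ds c ih =>
    rw [PySem.List.enumerate_append, List.foldl_append, ih]
    simp only [PySem.List.enumerate, List.foldl_cons, List.foldl_nil,
      lastIdxI_snoc, pAdd, pMul]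
    by_cases h1 : c = '+' ∨ c = '-'
    · have h2 : ¬ (c = '*' ∨ c = '/') := by rcases h1 with rfl | rfl <;> simp
      simp [h1, h2]
    · by_cases h2 : c = '*' ∨ c = '/' <;> simp [h1, h2]

theorem loopA_no_add (cs : List Char) (h : ∀ x ∈ cs, pAdd x = false) :
    ∀ n, n ≤ cs.length →
      verificar_operador_loop cs n =
        (if lastIdxI pMul (cs.take n) = -1 then none else some (lastIdxI pMul (cs.take n))) := by
  intro n
  induction n with
  | zero => simp [verificar_operador_loop, lastIdxI]
  | succ n ih =>
    intro hn
    have hlt : n < cs.length := hn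
    have hget : PySem.List.pyGet? cs (n : Int) = some cs[n] := by
      rw [PySem.List.pyGet?_natCast]; simp [hlt]
    have htake : cs.take (n + 1) = cs.take n ++ [cs[n]] := by
      rw [List.take_add_one]; simp [hlt]
    have hlen : ((cs.take n).length : Int) = (n : Int) := by
      simp [List.length_take, Nat.min_eq_left (Nat.le_of_lt hlt)]
    have hmem := List.getElem_mem hlt
    have hadd : pAdd cs[n] = false := h _ hmem
    have hnotadd : ¬ (cs[n] = '+' ∨ cs[n] = '-') := by simpa [pAdd] using hadd
    rw [verificar_operador_loop, hget, htake, lastIdxI_snoc]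
    by_cases hmul : cs[n] = '*' ∨ cs[n] = '/'
    · have hm : pMul cs[n] = true := by simpa [pMul] using hmul
      simp only [hnotadd, if_false, (no_add_iff cs).mpr h, and_self, if_true, hmul, hm]
      rw [if_neg (show ¬((cs.take n).length : Int) = -1 by omega), hlen]
    · have hm : pMul cs[n] = false := by simpa [pMul] using hmul
      simp only [hnotadd, if_false, (no_add_iff cs).mpr h, and_self, if_true, hmul, hm]
      exact ih (Nat.le_of_lt hlt)

theorem loopA_add (cs : List Char) (h : ¬ ∀ x ∈ cs, pAdd x = false) :
    ∀ n, n ≤ cs.length →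
      verificar_operador_loop cs n =
        (if lastIdxI pAdd (cs.take n) = -1 then none else some (lastIdxI pAdd (cs.take n))) := by
  intro n
  induction n with
  | zero => simp [verificar_operador_loop, lastIdxI]
  | succ n ih =>
    intro hn
    have hlt : n < cs.length := hn
    have hget : PySem.List.pyGet? cs (n : Int) = some cs[n] := by
      rw [PySem.List.pyGet?_natCast]; simp [hlt]
    have htake : cs.take (n + 1) = cs.take n ++ [cs[n]] := by
      rw [List.take_add_one]; simp [hlt]
    have hlen : ((cs.take n).length : Int) = (n : Int) := by
      simp [List.length_take, Nat.min_eq_left (Nat.le_of_lt hlt)]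
    have hcond : ¬ (PySem.Chars.isIn ['+'] cs = false ∧ PySem.Chars.isIn ['-'] cs = false) := by
      rw [no_add_iff]; exact h
    rw [verificar_operador_loop, hget, htake, lastIdxI_snoc]
    by_cases haddc : cs[n] = '+' ∨ cs[n] = '-'
    · have hp : pAdd cs[n] = true := by simpa [pAdd] using haddc
      simp only [haddc, if_true, hp]
      rw [if_neg (show ¬((cs.take n).length : Int) = -1 by omega), hlen]
    · have hp : pAdd cs[n] = false := by simpa [pAdd] using haddc
      simp only [haddc, if_false, hp, hcond]
      exact ih (Nat.le_of_lt hlt)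

-- ===== VERDICT (by name: the statement is the Claim_ definition above) =====
theorem verificar_operador_spec : Claim_equal_verificar_operador := by
  intro s _
  unfold Spec_verificar_operador verificar_operador verificar_operador_alt
  set cs := s.toList with hcs
  rw [bfold_eq]
  by_cases h : ∀ x ∈ cs, pAdd x = false
  · have ha : lastIdxI pAdd cs = -1 := (lastIdxI_eq_neg_one_iff _ _).mpr h
    rw [loopA_no_add cs h cs.length le_rfl, List.take_length]
    by_cases hm : lastIdxI pMul cs = -1 <;> simp [ha, hm]
  · have ha : lastIdxI pAdd cs ≠ -1 := fun hc => h ((lastIdxI_eq_neg_one_iff _ _).mp hc)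
    rw [loopA_add cs h cs.length le_rfl, List.take_length]
    simp [ha]
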